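-- pv_equiv track=rewrite | github.com/austral-prog/tp-7-montanarisofia-1 | loops_and_print.py | enumerate_backwards
-- ===== SOURCE A (Python) =====
-- def enumerate_backwards(strings):
--     list1=[]
--     list2=[]
--     for str1 in strings:
--         if str1 != "":
--             list1.append(str1)
--     for index, str2 in enumerate(list1):
--         list2.append(f"{index}. {str2[::-1]}")
--     return list2
-- ===== SOURCE B (Python) =====
-- def enumerate_backwards(strings):
--     result = []
--     n = 0
--     for s in strings:
--         if s != "":
--             result.append(f"{n}. {s[::-1]}")
--             n += 1
--     return result
-- ===== Notes on version B (the rewrite author's own statement) =====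
-- stated objective: simpler
-- what changed: Single pass with a manual counter incremented only on kept strings, replacing A's two-phase filter-then-enumerate over an intermediate list.
import Mathlib
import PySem

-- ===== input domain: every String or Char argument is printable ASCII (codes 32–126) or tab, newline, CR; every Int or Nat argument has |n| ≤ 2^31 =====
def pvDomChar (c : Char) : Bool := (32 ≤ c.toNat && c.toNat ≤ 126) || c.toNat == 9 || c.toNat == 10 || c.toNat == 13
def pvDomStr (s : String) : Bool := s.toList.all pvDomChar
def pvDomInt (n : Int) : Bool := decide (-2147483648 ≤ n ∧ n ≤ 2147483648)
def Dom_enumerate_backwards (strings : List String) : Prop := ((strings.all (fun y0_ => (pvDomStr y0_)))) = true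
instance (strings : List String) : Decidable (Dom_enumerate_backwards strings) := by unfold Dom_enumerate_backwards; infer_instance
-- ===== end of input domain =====

-- B does A's work in one pass with a manual counter incremented only on kept strings (objective: simpler).

-- f"{i}. {s[::-1]}" (printable-ASCII exact: digits of i, ". ", reversed characters of s)
def pvFmt (i : Int) (s : String) : String :=
  String.ofList (PySem.Int.toChars i ++ (". ").toList ++ s.toList.reverse)

-- ===== PORT A =====
def enumerate_backwards (strings : List String) : List String :=
  let list1 := strings.foldl (fun acc str1 => if str1 ≠ "" then acc ++ [str1] else acc) []
  let list2 := (PySem.List.enumerate list1 0).foldl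
    (fun acc p => acc ++ [pvFmt p.1 p.2]) []
  list2

-- ===== PORT B =====
def enumerate_backwards_altAux (n : Int) : List String → List String
  | [] => []
  | s :: rest =>
    if s ≠ "" then pvFmt n s :: enumerate_backwards_altAux (n + 1) rest
    else enumerate_backwards_altAux n rest

def enumerate_backwards_alt (strings : List String) : List String :=
  enumerate_backwards_altAux 0 strings

-- ===== PRECONDITION & SPEC =====
def Spec_enumerate_backwards (strings : List String) (out : List String) : Prop := out = enumerate_backwards_alt strings
instance (strings : List String) (out : List String) : Decidable (Spec_enumerate_backwards strings out) := by unfold Spec_enumerate_backwards; infer_instance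

-- ===== CLAIM (what is proved, stated in full; the proofs are below) =====
def Claim_equal_enumerate_backwards : Prop := ∀ (strings : List String), Dom_enumerate_backwards strings → Spec_enumerate_backwards strings (enumerate_backwards strings)

-- ===== LEMMAS AND PROOFS =====

-- mapping pvFmt over the enumeration of the filtered list is exactly B's counter loop
theorem enumerate_filter_eq_altAux (xs : List String) (n : Int) :
    (PySem.List.enumerate (xs.filter (fun s => s ≠ "")) n).map (fun p => pvFmt p.1 p.2)
      = enumerate_backwards_altAux n xs := by
  induction xs generalizing n with
  | nil => simp [enumerate_backwards_altAux, PySem.List.enumerate_nil]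
  | cons s rest ih =>
    by_cases hs : s = ""
    · simpa [hs, enumerate_backwards_altAux] using ih n
    · simpa [hs, PySem.List.enumerate_cons, enumerate_backwards_altAux] using ih (n + 1)

-- ===== VERDICT (by name: the statement is the Claim_ definition above) =====
theorem enumerate_backwards_spec : Claim_equal_enumerate_backwards := by
  intro strings _
  unfold Spec_enumerate_backwards
  simp only [enumerate_backwards, enumerate_backwards_alt,
    PySem.List.foldl_append_ite_eq_filter, PySem.List.foldl_append_singleton_eq_map,
    List.nil_append]
  simpa using enumerate_filter_eq_altAux strings 0
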